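-- pv_equiv track=rewrite | github.com/cervenyxp/hass_sscp_integration | custom_components/sscp_integration/runtime.py | _upsert_entity
-- ===== SOURCE A (Python) =====
-- from typing import Any
--
-- def _upsert_entity(items: list[dict[str, Any]], entity: dict[str, Any]) -> list[dict[str, Any]]:
--     entity_key = str(entity.get("entity_key") or "").strip()
--     if not entity_key:
--         raise ValueError("Composer entita nema entity_key.")
--     existing_index = next(
--         (index for index, item in enumerate(items) if str(item.get("entity_key")) == entity_key),
--         None,
--     )
--     updated = list(items)
--     if existing_index is None:
--         updated.append(entity)
--     else:
--         updated[existing_index] = entity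
--     return updated
-- ===== SOURCE B (Python) =====
-- from typing import Any
--
-- def _upsert_entity(items: list[dict[str, Any]], entity: dict[str, Any]) -> list[dict[str, Any]]:
--     entity_key = str(entity.get("entity_key") or "").strip()
--     if not entity_key:
--         raise ValueError("Composer entita nema entity_key.")
--     result: list[dict[str, Any]] = []
--     found = False
--     for item in items:
--         if not found and str(item.get("entity_key")) == entity_key:
--             result.append(entity)
--             found = True
--         else:
--             result.append(item)
--     if not found:
--         result.append(entity)
--     return result
-- ===== Notes on version B (the rewrite author's own statement) =====
-- stated objective: simpler
-- what changed: Replaces the next()+enumerate index search followed by copy-and-assign with a single flag-driven rebuild pass that emits entity in place of the first matching item (or appends it at the end).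
import Mathlib
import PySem

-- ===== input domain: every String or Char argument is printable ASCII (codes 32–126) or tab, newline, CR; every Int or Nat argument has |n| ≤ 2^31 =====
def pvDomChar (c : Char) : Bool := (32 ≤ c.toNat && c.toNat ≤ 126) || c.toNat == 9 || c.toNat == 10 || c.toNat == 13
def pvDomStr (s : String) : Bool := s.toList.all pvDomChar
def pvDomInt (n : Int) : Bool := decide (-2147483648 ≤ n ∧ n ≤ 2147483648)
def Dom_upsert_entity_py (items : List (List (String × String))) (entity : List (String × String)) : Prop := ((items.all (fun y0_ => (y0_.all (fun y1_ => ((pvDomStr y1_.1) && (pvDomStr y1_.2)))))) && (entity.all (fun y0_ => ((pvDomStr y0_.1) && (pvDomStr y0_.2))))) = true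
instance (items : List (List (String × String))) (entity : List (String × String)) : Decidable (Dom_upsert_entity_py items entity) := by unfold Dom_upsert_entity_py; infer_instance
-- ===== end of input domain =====

-- B: one flag-driven rebuild pass instead of index search + copy + assignment; objective: simpler.


-- ===== PORT A =====
-- shared helper: str(item.get("entity_key")) — str(None) = "None" when the key is absent
def pvKeyStr (item : List (String × String)) : String :=
  match PySem.Dict.get? ⟨item⟩ "entity_key" with
  | none => "None"
  | some v => v

-- str(entity.get("entity_key") or "").strip() — None and "" both fall to ""
def pvEntityKey (entity : List (String × String)) : String :=
  PySem.Str.strip (((PySem.Dict.get? ⟨entity⟩ "entity_key")).getD "")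

-- next((i for i, item in enumerate(items) if str(item.get("entity_key")) == ek), None)
def pvFindIdx (ek : String) : List (List (String × String)) → Option Nat
  | [] => none
  | item :: rest =>
    if pvKeyStr item = ek then some 0 else (pvFindIdx ek rest).map (· + 1)

def upsert_entity_py (items : List (List (String × String))) (entity : List (String × String)) : List (List (String × String)) :=
  let entity_key := pvEntityKey entity
  match pvFindIdx entity_key items with
  | none => items ++ [entity]          -- updated = list(items); updated.append(entity)
  | some i => items.set i entity       -- updated = list(items); updated[i] = entity

-- ===== PORT B =====
-- flag-driven single-pass rebuild (the loop of Source B, found as an accumulator)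
def pvRebuild (ek : String) (entity : List (String × String)) :
    List (List (String × String)) → Bool → List (List (String × String))
  | [], found => if found then [] else [entity]
  | item :: rest, found =>
    if !found && pvKeyStr item = ek then entity :: pvRebuild ek entity rest true
    else item :: pvRebuild ek entity rest found

def upsert_entity_py_alt (items : List (List (String × String))) (entity : List (String × String)) : List (List (String × String)) :=
  pvRebuild (pvEntityKey entity) entity items false

-- ===== PRECONDITION & SPEC =====
-- Pre_ excludes exactly the inputs where A raises ValueError (empty entity_key after strip)
def Pre_upsert_entity_py (items : List (List (String × String))) (entity : List (String × String)) : Prop :=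
  pvEntityKey entity ≠ ""
instance (items : List (List (String × String))) (entity : List (String × String)) : Decidable (Pre_upsert_entity_py items entity) := by unfold Pre_upsert_entity_py; infer_instance
def pvWitness_upsert_entity_py : (List (List (String × String))) × (List (String × String)) :=
  ([[("entity_key", "x")]], [("entity_key", "x")])

def Spec_upsert_entity_py (items : List (List (String × String))) (entity : List (String × String)) (out : List (List (String × String))) : Prop := out = upsert_entity_py_alt items entity
instance (items : List (List (String × String))) (entity : List (String × String)) (out : List (List (String × String))) : Decidable (Spec_upsert_entity_py items entity out) := by unfold Spec_upsert_entity_py; infer_instance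

-- ===== CLAIM (what is proved, stated in full; the proofs are below) =====
def Claim_equal_upsert_entity_py : Prop := ∀ (items : List (List (String × String))) (entity : List (String × String)), Dom_upsert_entity_py items entity → Pre_upsert_entity_py items entity → Spec_upsert_entity_py items entity (upsert_entity_py items entity)

-- ===== LEMMAS AND PROOFS =====
theorem pvRebuild_true (ek : String) (entity : List (String × String)) (items : List (List (String × String))) :
    pvRebuild ek entity items true = items := by
  induction items with
  | nil => rfl
  | cons item rest ih => simp [pvRebuild, ih]

theorem pvRebuild_eq (ek : String) (entity : List (String × String)) (items : List (List (String × String))) :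
    pvRebuild ek entity items false =
      (match pvFindIdx ek items with
       | none => items ++ [entity]
       | some i => items.set i entity) := by
  induction items with
  | nil => rfl
  | cons item rest ih =>
    by_cases h : pvKeyStr item = ek
    · simp [pvRebuild, pvFindIdx, h, pvRebuild_true]
    · simp only [pvRebuild, pvFindIdx, h, Bool.not_false, Bool.true_and, if_false, ih]
      cases hf : pvFindIdx ek rest <;> simp

-- ===== VERDICT (by name: the statement is the Claim_ definition above) =====
theorem upsert_entity_py_spec : Claim_equal_upsert_entity_py := by
  intro items entity _ _
  unfold Spec_upsert_entity_py upsert_entity_py upsert_entity_py_alt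
  exact (pvRebuild_eq _ _ _).symm
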